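-- pv_equiv track=rewrite | github.com/josesiqueira/tere4ai | ingestion/structural/missing_detector.py | map_articles_to_chunks
-- ===== SOURCE A (Python) =====
-- from typing import List, Set, Dict
--
-- def map_articles_to_chunks(missing_articles: Set[int]) -> List[str]:
--     """
--     Map missing article numbers to their source chunk labels.
--
--     The EU AI Act is split into chunks with known patterns:
--     - CHAPTER I through XIII (may be split into sections)
--     - CHAPTER III is split into SECTION 1-5
--
--     Args:
--         missing_articles: Set of missing article numbers
--
--     Returns:
--         List of chunk labels to re-process
--     """
--     # Article number ranges for each chunk (approximate based on EU AI Act structure)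
--     # This mapping is based on the official EU AI Act structure
--     article_to_chunk_map = {
--         # Chapter I: Articles 1-4
--         (1, 4): "CHAPTER I - General provisions",
--
--         # Chapter II: Article 5
--         (5, 5): "CHAPTER II - Prohibited artificial intelligence practices",
--
--         # Chapter III (Sections 1-5): Articles 6-49
--         (6, 7): "CHAPTER III - SECTION 1",     # Section 1
--         (8, 15): "CHAPTER III - SECTION 2",    # Section 2
--         (16, 27): "CHAPTER III - SECTION 3",   # Section 3
--         (28, 39): "CHAPTER III - SECTION 4",   # Section 4
--         (40, 49): "CHAPTER III - SECTION 5",   # Section 5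
--
--         # Chapter IV: Article 50
--         (50, 50): "CHAPTER IV - Transparency obligations for providers and deployers of certain AI systems",
--
--         # Chapter V: Articles 51-56
--         (51, 56): "CHAPTER V - General-purpose AI models",
--
--         # Chapter VI: Article 57
--         (57, 57): "CHAPTER VI - Measures in support of innovation",
--
--         # Chapter VII: Articles 58-64
--         (58, 64): "CHAPTER VII - Governance",
--
--         # Chapter VIII: Article 65
--         (65, 65): "CHAPTER VIII - EU database for high-risk AI systems",
--
--         # Chapter IX: Articles 66-73
--         (66, 73): "CHAPTER IX - Post-market monitoring, information sharing and market surveillance",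
--
--         # Chapter X: Articles 74-77
--         (74, 77): "CHAPTER X - Codes of conduct and guidelines",
--
--         # Chapter XI: Articles 78-81
--         (78, 81): "CHAPTER XI - Delegation of powers and committee procedure",
--
--         # Chapter XII: Articles 82-84
--         (82, 84): "CHAPTER XII - Penalties",
--
--         # Chapter XIII: Articles 85-113
--         (85, 113): "CHAPTER XIII - Final provisions",
--     }
--
--     chunks_to_reprocess = set()
--
--     for article_num in missing_articles:
--         # Find which chunk this article belongs to
--         for (start, end), chunk_label in article_to_chunk_map.items():
--             if start <= article_num <= end:
--                 chunks_to_reprocess.add(chunk_label)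
--                 break
--
--     return sorted(chunks_to_reprocess)
-- ===== SOURCE B (Python) =====
-- from bisect import bisect_right
-- from typing import List, Set
--
-- # The EU AI Act ranges are contiguous (1..113), so only the start of each chunk
-- # plus its label is needed: article a (1 <= a <= 113) belongs to the chunk whose
-- # start is the rightmost one <= a, found by binary search.
-- _STARTS = [1, 5, 6, 8, 16, 28, 40, 50, 51, 57, 58, 65, 66, 74, 78, 82, 85]
-- _LABELS = [
--     "CHAPTER I - General provisions",
--     "CHAPTER II - Prohibited artificial intelligence practices",
--     "CHAPTER III - SECTION 1",
--     "CHAPTER III - SECTION 2",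
--     "CHAPTER III - SECTION 3",
--     "CHAPTER III - SECTION 4",
--     "CHAPTER III - SECTION 5",
--     "CHAPTER IV - Transparency obligations for providers and deployers of certain AI systems",
--     "CHAPTER V - General-purpose AI models",
--     "CHAPTER VI - Measures in support of innovation",
--     "CHAPTER VII - Governance",
--     "CHAPTER VIII - EU database for high-risk AI systems",
--     "CHAPTER IX - Post-market monitoring, information sharing and market surveillance",
--     "CHAPTER X - Codes of conduct and guidelines",
--     "CHAPTER XI - Delegation of powers and committee procedure",
--     "CHAPTER XII - Penalties",
--     "CHAPTER XIII - Final provisions",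
-- ]
--
--
-- def map_articles_to_chunks(missing_articles: Set[int]) -> List[str]:
--     """Map missing article numbers to their source chunk labels by binary search
--     over the chunk start boundaries."""
--     chunks = set()
--     for a in missing_articles:
--         if 1 <= a <= 113:
--             chunks.add(_LABELS[bisect_right(_STARTS, a) - 1])
--     return sorted(chunks)
-- ===== Notes on version B (the rewrite author's own statement) =====
-- stated objective: faster
-- what changed: B exploits that the 17 ranges tile 1..113 contiguously: it keeps only the sorted chunk start boundaries plus a parallel label list and finds each article's chunk by binary search (bisect_right) after a single bounds check, instead of A's per-article linear first-match scan over the range dict.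
import Mathlib
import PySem

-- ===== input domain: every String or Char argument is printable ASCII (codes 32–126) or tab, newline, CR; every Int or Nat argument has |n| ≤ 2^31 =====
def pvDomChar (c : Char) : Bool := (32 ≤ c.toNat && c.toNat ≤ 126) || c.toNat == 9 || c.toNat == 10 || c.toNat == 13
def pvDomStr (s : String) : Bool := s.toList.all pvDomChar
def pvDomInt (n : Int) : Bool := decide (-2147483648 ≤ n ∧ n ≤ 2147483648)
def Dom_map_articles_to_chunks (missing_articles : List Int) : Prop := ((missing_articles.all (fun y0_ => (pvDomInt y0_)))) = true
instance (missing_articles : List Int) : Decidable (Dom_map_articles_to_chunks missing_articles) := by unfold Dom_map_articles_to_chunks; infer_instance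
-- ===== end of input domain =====

-- B replaces A's per-article linear first-match scan over the 17 (start,end) ranges by a
-- binary search (bisect_right) over the chunk start boundaries, exploiting that the ranges
-- are contiguous over 1..113 (objective: faster; constant-factor, measured).

-- ===== PORT A =====
-- A's dict literal article_to_chunk_map, in insertion order
def pvChunkMapA : PySem.Dict (Int × Int) String := PySem.Dict.ofList [
  ((1, 4), "CHAPTER I - General provisions"),
  ((5, 5), "CHAPTER II - Prohibited artificial intelligence practices"),
  ((6, 7), "CHAPTER III - SECTION 1"),
  ((8, 15), "CHAPTER III - SECTION 2"),
  ((16, 27), "CHAPTER III - SECTION 3"),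
  ((28, 39), "CHAPTER III - SECTION 4"),
  ((40, 49), "CHAPTER III - SECTION 5"),
  ((50, 50), "CHAPTER IV - Transparency obligations for providers and deployers of certain AI systems"),
  ((51, 56), "CHAPTER V - General-purpose AI models"),
  ((57, 57), "CHAPTER VI - Measures in support of innovation"),
  ((58, 64), "CHAPTER VII - Governance"),
  ((65, 65), "CHAPTER VIII - EU database for high-risk AI systems"),
  ((66, 73), "CHAPTER IX - Post-market monitoring, information sharing and market surveillance"),
  ((74, 77), "CHAPTER X - Codes of conduct and guidelines"),
  ((78, 81), "CHAPTER XI - Delegation of powers and committee procedure"),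
  ((82, 84), "CHAPTER XII - Penalties"),
  ((85, 113), "CHAPTER XIII - Final provisions")]

-- A's inner 'for … if start <= n <= end: add; break' loop: first matching item's label
def pvFindChunk : List ((Int × Int) × String) → Int → Option String
  | [], _ => none
  | (r, lab) :: rest, n => if r.1 ≤ n && n ≤ r.2 then some lab else pvFindChunk rest n

def map_articles_to_chunks (missing_articles : List Int) : List String :=
  let chunks_to_reprocess : PySem.Set String :=
    missing_articles.foldl (fun acc article_num =>
      match pvFindChunk pvChunkMapA.items article_num with
      | some lab => PySem.Set.add acc lab
      | none => acc) PySem.Set.empty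
  PySem.List.sorted chunks_to_reprocess (fun x => x) false

-- ===== PORT B =====
-- B's _STARTS: the start boundary of each chunk (the ranges tile 1..113 contiguously)
def pvStarts : List Int := [1, 5, 6, 8, 16, 28, 40, 50, 51, 57, 58, 65, 66, 74, 78, 82, 85]

-- B's _LABELS, parallel to _STARTS
def pvLabels : List String := [
  "CHAPTER I - General provisions",
  "CHAPTER II - Prohibited artificial intelligence practices",
  "CHAPTER III - SECTION 1",
  "CHAPTER III - SECTION 2",
  "CHAPTER III - SECTION 3",
  "CHAPTER III - SECTION 4",
  "CHAPTER III - SECTION 5",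
  "CHAPTER IV - Transparency obligations for providers and deployers of certain AI systems",
  "CHAPTER V - General-purpose AI models",
  "CHAPTER VI - Measures in support of innovation",
  "CHAPTER VII - Governance",
  "CHAPTER VIII - EU database for high-risk AI systems",
  "CHAPTER IX - Post-market monitoring, information sharing and market surveillance",
  "CHAPTER X - Codes of conduct and guidelines",
  "CHAPTER XI - Delegation of powers and committee procedure",
  "CHAPTER XII - Penalties",
  "CHAPTER XIII - Final provisions"]

-- _LABELS[bisect_right(_STARTS, a) - 1]: under the guard 1 <= a <= 113 the index is always
-- in range (bisect_right >= 1), so List.getD is exact here.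
def map_articles_to_chunks_alt (missing_articles : List Int) : List String :=
  let chunks :=
    missing_articles.foldl (fun chunks a =>
      if 1 ≤ a && a ≤ 113 then
        PySem.Set.add chunks (pvLabels.getD (PySem.List.bisectRight pvStarts a - 1) "")
      else chunks) PySem.Set.empty
  PySem.List.sorted chunks (fun x => x) false

-- ===== PRECONDITION & SPEC =====
def Spec_map_articles_to_chunks (missing_articles : List Int) (out : List String) : Prop := out = map_articles_to_chunks_alt missing_articles
instance (missing_articles : List Int) (out : List String) : Decidable (Spec_map_articles_to_chunks missing_articles out) := by unfold Spec_map_articles_to_chunks; infer_instance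

-- ===== CLAIM =====
def Claim_equal_map_articles_to_chunks : Prop := ∀ (missing_articles : List Int), Dom_map_articles_to_chunks missing_articles → Spec_map_articles_to_chunks missing_articles (map_articles_to_chunks missing_articles)

-- ===== LEMMAS AND PROOFS =====

set_option maxRecDepth 4000 in
set_option maxHeartbeats 1000000 in
-- In range 1..113, A's first-match scan agrees with B's bisect lookup (all 113 cases checked).
lemma pv_key_in : ∀ k : Fin 113,
    pvFindChunk pvChunkMapA.items (1 + (k : Int))
      = some (pvLabels.getD (PySem.List.bisectRight pvStarts (1 + (k : Int)) - 1) "") := by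
  decide

-- a scan over items none of whose ranges contains n finds nothing
lemma pv_find_none (n : Int) :
    ∀ (l : List ((Int × Int) × String)), (∀ p ∈ l, ¬ (p.1.1 ≤ n ∧ n ≤ p.1.2)) →
      pvFindChunk l n = none := by
  intro l
  induction l with
  | nil => intro _; rfl
  | cons p ps ih =>
      intro hb
      have hp := hb p List.mem_cons_self
      simp only [pvFindChunk]
      rw [if_neg (by simp only [Bool.and_eq_true, decide_eq_true_eq]; omega)]
      exact ih (fun q hq => hb q (List.mem_cons_of_mem _ hq))

-- Outside 1..113 no range of A's map matches.
lemma pv_key_out (a : Int) (h : a < 1 ∨ 113 < a) :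
    pvFindChunk pvChunkMapA.items a = none := by
  have hb : ∀ p ∈ pvChunkMapA.items, (1:Int) ≤ p.1.1 ∧ p.1.2 ≤ 113 := by decide
  exact pv_find_none a _ (fun p hp => by have := hb p hp; omega)

-- The two per-article step functions of the folds are equal.
lemma pv_step_eq :
    (fun (acc : PySem.Set String) (article_num : Int) =>
      match pvFindChunk pvChunkMapA.items article_num with
      | some lab => PySem.Set.add acc lab
      | none => acc)
    = (fun (chunks : PySem.Set String) (a : Int) =>
      if 1 ≤ a && a ≤ 113 then
        PySem.Set.add chunks (pvLabels.getD (PySem.List.bisectRight pvStarts a - 1) "")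
      else chunks) := by
  funext acc a
  by_cases h : 1 ≤ a ∧ a ≤ 113
  · have hk : a = 1 + (((a - 1).toNat : Int)) := by omega
    have hlt : (a - 1).toNat < 113 := by omega
    rw [hk, pv_key_in ⟨(a - 1).toNat, hlt⟩]
    rw [if_pos (by simp only [Bool.and_eq_true, decide_eq_true_eq]; omega)]
  · rw [pv_key_out a (by omega)]
    rw [if_neg (by simp only [Bool.and_eq_true, decide_eq_true_eq]; omega)]

-- ===== VERDICT =====
theorem map_articles_to_chunks_spec : Claim_equal_map_articles_to_chunks := by
  intro missing_articles _
  unfold Spec_map_articles_to_chunks map_articles_to_chunks map_articles_to_chunks_alt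
  rw [pv_step_eq]
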